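-- pv_equiv track=rewrite | github.com/jamesconradshea/civ4 | randomCityNames/Assets/Python/Contrib/RandomCityNames.py | customize
-- ===== SOURCE A (Python) =====
-- def customize(result):
-- 	base = result.title()
-- 	res = u""
-- 	for c in base:
-- 		if res == u"'":
-- 			res = res + c.capitalize()
-- 		elif res.endswith(u"'"):
-- 			res = res + c.lower()
-- 		else:
-- 			res = res + c
-- 	return res
-- ===== SOURCE B (Python) =====
-- def _lowfirst(seg):
--     return seg[:1].lower() + seg[1:]
--
-- def customize(result):
--     parts = result.title().split("'")
--     rest = parts[1:]
--     if parts[0] == "" and rest: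
--         fixed = [parts[0], rest[0]] + [_lowfirst(s) for s in rest[1:]]
--     else:
--         fixed = [parts[0]] + [_lowfirst(s) for s in rest]
--     return "'".join(fixed)
-- ===== Notes on version B (the rewrite author's own statement) =====
-- stated objective: simpler
-- what changed: Replaces A's character-by-character accumulator state machine (which re-tests the growing result with equality/endswith checks at every character) by a whole-segment decomposition: titlecase, split on apostrophes, lowercase the first character of each later segment except the segment right after a leading apostrophe, and rejoin.
import Mathlib
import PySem

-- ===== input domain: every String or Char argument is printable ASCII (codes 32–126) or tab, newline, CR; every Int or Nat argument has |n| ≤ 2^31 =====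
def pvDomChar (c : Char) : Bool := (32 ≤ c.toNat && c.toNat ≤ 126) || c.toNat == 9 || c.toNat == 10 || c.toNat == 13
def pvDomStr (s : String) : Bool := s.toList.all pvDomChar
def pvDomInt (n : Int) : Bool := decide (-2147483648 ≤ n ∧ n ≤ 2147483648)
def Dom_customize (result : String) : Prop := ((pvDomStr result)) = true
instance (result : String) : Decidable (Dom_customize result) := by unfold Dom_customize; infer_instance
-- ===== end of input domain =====

-- B replaces A's char-by-char accumulator state machine by split-on-apostrophe /
-- adjust whole segments / rejoin (objective: simpler decomposition, same cost).

-- ===== PORT A =====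
-- shared helper: result.title() — hand port, exact on the ASCII domain where
-- Python's "cased" characters are exactly the letters (c.isalpha)
def pvTitle (cs : List Char) : List Char :=
  (cs.foldl (fun (acc : List Char × Bool) c =>
      (acc.1 ++ [if PySem.Chars.isalpha c then
                   (if acc.2 then PySem.Chars.lowerChar c else PySem.Chars.upperChar c)
                 else c],
       PySem.Chars.isalpha c)) ([], false)).1

def customize (result : String) : String :=
  -- base = result.title(); res = ""; for c in base: …
  String.mk ((pvTitle result.toList).foldl (fun res c =>
    if res = ['\''] then res ++ [PySem.Chars.upperChar c]   -- c.capitalize() on one char = upper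
    else if PySem.Chars.endswith res ['\''] then res ++ [PySem.Chars.lowerChar c]
    else res ++ [c]) [])

-- ===== PORT B =====
-- seg[:1].lower() + seg[1:]
def pvLowfirst (seg : List Char) : List Char :=
  PySem.Chars.lower (PySem.List.slice seg none (some 1)) ++ PySem.List.slice seg (some 1) none

def customize_alt (result : String) : String :=
  let parts := PySem.Chars.splitOn (pvTitle result.toList) ['\'']
  let fixed :=
    match parts with
    | [] => []                                  -- unreachable: split never returns []
    | p0 :: rest =>
      match p0, rest with
      | [], r0 :: rtl => [] :: r0 :: rtl.map pvLowfirst   -- parts[0]=="" and rest: keep rest[0]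
      | _, _ => p0 :: rest.map pvLowfirst
  String.mk (PySem.Chars.join ['\''] fixed)

-- ===== PRECONDITION & SPEC =====
def Spec_customize (result : String) (out : String) : Prop := out = customize_alt result
instance (result : String) (out : String) : Decidable (Spec_customize result out) := by unfold Spec_customize; infer_instance

-- ===== CLAIM (what is proved, stated in full; the proofs are below) =====
def Claim_equal_customize : Prop := ∀ (result : String), Dom_customize result → Spec_customize result (customize result)

-- ===== LEMMAS AND PROOFS =====

-- the common pointwise behaviour: go b cs lowercases each char that follows an
-- apostrophe (b = "previous emitted char was an apostrophe")
def pvGo (b : Bool) : List Char → List Char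
  | [] => []
  | c :: cs =>
    let c' := if b then PySem.Chars.lowerChar c else c
    c' :: pvGo (c' == '\'') cs

-- pure recursive characterization of splitOn · ['\'']
def pvMsplit : List Char → List (List Char)
  | [] => [[]]
  | c :: cs =>
    if c = '\'' then [] :: pvMsplit cs
    else match pvMsplit cs with
         | [] => [[c]]
         | h :: t => (c :: h) :: t

-- pure recursive characterization of pvTitle
def pvTgo (b : Bool) : List Char → List Char
  | [] => []
  | c :: cs =>
    (if PySem.Chars.isalpha c then
       (if b then PySem.Chars.lowerChar c else PySem.Chars.upperChar c)
     else c) :: pvTgo (PySem.Chars.isalpha c) cs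


theorem char_toNat_ofNat_add (n : Nat) (h : n < 55296) : (Char.ofNat n).toNat = n := by
  rw [Char.toNat_ofNat]
  simp [Nat.isValidChar, h]

theorem le_toNat {a b : Char} : a ≤ b ↔ a.toNat ≤ b.toNat := by
  rfl

theorem lowerChar_eq_apos (c : Char) : (PySem.Chars.lowerChar c = '\'') ↔ c = '\'' := by
  unfold PySem.Chars.lowerChar PySem.Chars.isupper
  split_ifs with h
  · simp only [Bool.and_eq_true, decide_eq_true_eq, le_toNat] at h
    have hA : ('A' : Char).toNat = 65 := by decide
    have hZ : ('Z' : Char).toNat = 90 := by decide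
    rw [hA] at h; rw [hZ] at h
    constructor
    · intro he
      exfalso
      have h2 : (Char.ofNat (c.toNat + 32)).toNat = c.toNat + 32 :=
        char_toNat_ofNat_add _ (by omega)
      rw [he] at h2
      have : ('\'' : Char).toNat = 39 := by decide
      omega
    · intro he; subst he; exfalso; revert h; decide
  · simp

theorem upperChar_eq_apos (c : Char) : (PySem.Chars.upperChar c = '\'') ↔ c = '\'' := by
  unfold PySem.Chars.upperChar PySem.Chars.islower
  split_ifs with h
  · simp only [Bool.and_eq_true, decide_eq_true_eq, le_toNat] at h
    have ha : ('a' : Char).toNat = 97 := by decide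
    have hz : ('z' : Char).toNat = 122 := by decide
    rw [ha] at h; rw [hz] at h
    constructor
    · intro he
      exfalso
      have h2 : (Char.ofNat (c.toNat - 32)).toNat = c.toNat - 32 :=
        char_toNat_ofNat_add _ (by omega)
      rw [he] at h2
      have : ('\'' : Char).toNat = 39 := by decide
      omega
    · intro he; subst he; exfalso; revert h; decide
  · simp

theorem upperChar_upperChar (c : Char) :
    PySem.Chars.upperChar (PySem.Chars.upperChar c) = PySem.Chars.upperChar c := by
  by_cases h : PySem.Chars.islower c = true
  · have h1 : PySem.Chars.upperChar c = Char.ofNat (c.toNat - 32) := by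
      unfold PySem.Chars.upperChar; rw [if_pos h]
    rw [h1]
    unfold PySem.Chars.upperChar
    rw [if_neg]
    unfold PySem.Chars.islower at h ⊢
    simp only [Bool.and_eq_true, decide_eq_true_eq, le_toNat] at h ⊢
    have ha : ('a' : Char).toNat = 97 := by decide
    have hz : ('z' : Char).toNat = 122 := by decide
    rw [ha] at h; rw [hz] at h
    have h3 : (Char.ofNat (c.toNat - 32)).toNat = c.toNat - 32 :=
      char_toNat_ofNat_add _ (by omega)
    rw [ha, hz]
    intro hc
    omega
  · have h1 : PySem.Chars.upperChar c = c := by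
      unfold PySem.Chars.upperChar; rw [if_neg h]
    rw [h1, h1]

theorem upperChar_of_not_alpha (c : Char) (h : PySem.Chars.isalpha c = false) :
    PySem.Chars.upperChar c = c := by
  unfold PySem.Chars.isalpha at h
  unfold PySem.Chars.upperChar
  simp only [Bool.or_eq_false_iff] at h
  rw [h.2]
  simp

-- pvTitle's foldl invariant
theorem pvTitle_fold (cs : List Char) : ∀ (acc : List Char) (b : Bool),
    (cs.foldl (fun (acc : List Char × Bool) c =>
      (acc.1 ++ [if PySem.Chars.isalpha c then
                   (if acc.2 then PySem.Chars.lowerChar c else PySem.Chars.upperChar c)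
                 else c],
       PySem.Chars.isalpha c)) (acc, b)).1 = acc ++ pvTgo b cs := by
  induction cs with
  | nil => intro acc b; simp [pvTgo]
  | cons c cs ih =>
    intro acc b
    simp only [List.foldl_cons, pvTgo]
    rw [ih]
    simp

theorem pvTitle_eq_tgo (cs : List Char) : pvTitle cs = pvTgo false cs := by
  unfold pvTitle
  rw [pvTitle_fold]
  simp

theorem pvMsplit_ne_nil (cs : List Char) : pvMsplit cs ≠ [] := by
  cases cs with
  | nil => simp [pvMsplit]
  | cons c cs =>
    simp only [pvMsplit]
    split_ifs
    · simp
    · cases pvMsplit cs <;> simp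

theorem go_split (fuel : Nat) : ∀ (l cur : List Char) (acc : List (List Char)),
    l.length < fuel →
    PySem.Chars.splitOn.go ['\''] fuel l cur acc
      = acc.reverse ++ ((cur.reverse ++ (pvMsplit l).headI) :: (pvMsplit l).tail) := by
  induction fuel with
  | zero => intro l cur acc h; omega
  | succ fuel ih =>
    intro l cur acc h
    cases l with
    | nil => simp [PySem.Chars.splitOn.go, pvMsplit]
    | cons c rest =>
      simp only [PySem.Chars.splitOn.go, List.isPrefixOf, Bool.and_true]
      by_cases hc : c = '\''
      · subst hc
        rw [if_pos (by simp)]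
        simp only [List.length_cons] at h
        rw [ih _ _ _ (by simpa using h)]
        obtain ⟨hh, ht, hm⟩ : ∃ hh ht, pvMsplit rest = hh :: ht := by
          cases hm : pvMsplit rest with
          | nil => exact absurd hm (pvMsplit_ne_nil rest)
          | cons hh ht => exact ⟨hh, ht, rfl⟩
        simp [pvMsplit, hm]
      · rw [if_neg (by simp [Ne.symm hc])]
        simp only [List.length_cons] at h
        rw [ih _ _ _ (by omega)]
        obtain ⟨hh, ht, hm⟩ : ∃ hh ht, pvMsplit rest = hh :: ht := by
          cases hm : pvMsplit rest with
          | nil => exact absurd hm (pvMsplit_ne_nil rest)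
          | cons hh ht => exact ⟨hh, ht, rfl⟩
        simp [pvMsplit, hc, hm]

theorem splitOn_eq_msplit (cs : List Char) :
    PySem.Chars.splitOn cs ['\''] = pvMsplit cs := by
  unfold PySem.Chars.splitOn
  rw [go_split (cs.length + 1) cs [] [] (by omega)]
  obtain ⟨hh, ht, hm⟩ : ∃ hh ht, pvMsplit cs = hh :: ht := by
    cases hm : pvMsplit cs with
    | nil => exact absurd hm (pvMsplit_ne_nil cs)
    | cons hh ht => exact ⟨hh, ht, rfl⟩
  simp [hm]

-- endswith on a non-empty list reads the last character
theorem endswith_apos (res : List Char) (c : Char) :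
    PySem.Chars.endswith (res ++ [c]) ['\''] = (c == '\'') := by
  unfold PySem.Chars.endswith
  simp [List.isSuffixOf, List.isPrefixOf, eq_comm]

theorem foldA (cs : List Char) : ∀ (res : List Char) (hne : res ≠ []) (_ : res ≠ ['\'']),
    cs.foldl (fun res c =>
      if res = ['\''] then res ++ [PySem.Chars.upperChar c]
      else if PySem.Chars.endswith res ['\''] then res ++ [PySem.Chars.lowerChar c]
      else res ++ [c]) res
    = res ++ pvGo (res.getLast hne == '\'') cs := by
  induction cs with
  | nil => intro res hne _; simp [pvGo]
  | cons c cs ih =>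
    intro res hne h1
    obtain ⟨res', d, hd⟩ : ∃ res' d, res = res' ++ [d] := by
      cases hr : res.reverse with
      | nil => exact absurd (by simpa using congrArg List.reverse hr) hne
      | cons d t => exact ⟨t.reverse, d, by simpa using congrArg List.reverse hr⟩
    subst hd
    have hlast : (res' ++ [d]).getLast hne = d := by simp
    have hsw : PySem.Chars.endswith (res' ++ [d]) ['\''] = (d == '\'') := endswith_apos res' d
    rw [hlast, List.foldl_cons]
    by_cases hd' : d = '\''
    · have hstep : (if res' ++ [d] = ['\''] then res' ++ [d] ++ [PySem.Chars.upperChar c]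
          else if PySem.Chars.endswith (res' ++ [d]) ['\''] = true then
            res' ++ [d] ++ [PySem.Chars.lowerChar c]
          else res' ++ [d] ++ [c]) = res' ++ [d] ++ [PySem.Chars.lowerChar c] := by
        rw [if_neg h1, hsw, hd']
        simp
      rw [hstep, ih (res' ++ [d] ++ [PySem.Chars.lowerChar c]) (by simp) (by
        intro hcontra
        have := congrArg List.length hcontra
        simp at this)]
      have hl2 : (res' ++ [d] ++ [PySem.Chars.lowerChar c]).getLast (by simp)
          = PySem.Chars.lowerChar c := by simp
      rw [hl2]
      simp [pvGo, hd']
    · have hbeq : (d == '\'') = false := by simp [hd']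
      have hstep : (if res' ++ [d] = ['\''] then res' ++ [d] ++ [PySem.Chars.upperChar c]
          else if PySem.Chars.endswith (res' ++ [d]) ['\''] = true then
            res' ++ [d] ++ [PySem.Chars.lowerChar c]
          else res' ++ [d] ++ [c]) = res' ++ [d] ++ [c] := by
        rw [if_neg h1, hsw, hbeq]
        simp
      rw [hstep, ih (res' ++ [d] ++ [c]) (by simp) (by
        intro hcontra
        have := congrArg List.length hcontra
        simp at this)]
      have hl2 : (res' ++ [d] ++ [c]).getLast (by simp) = c := by simp
      rw [hl2]
      simp [pvGo, hbeq]

theorem pvLowfirst_nil : pvLowfirst [] = [] := by decide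

theorem pvLowfirst_cons (c : Char) (cs : List Char) :
    pvLowfirst (c :: cs) = PySem.Chars.lowerChar c :: cs := by
  unfold pvLowfirst
  simp [PySem.List.slice, PySem.Chars.lower]

theorem join_msplit (cs : List Char) :
    PySem.Chars.join ['\''] ((pvMsplit cs).map pvLowfirst) = pvGo true cs ∧
    (∀ h t, pvMsplit cs = h :: t →
      PySem.Chars.join ['\''] (h :: t.map pvLowfirst) = pvGo false cs) := by
  induction cs with
  | nil =>
    constructor
    · simp [pvMsplit, pvGo, pvLowfirst_nil, PySem.Chars.join_singleton]
    · intro h t hm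
      simp only [pvMsplit] at hm
      cases hm
      simp [pvGo, PySem.Chars.join_singleton]
  | cons c cs ih =>
    obtain ⟨hh, ht, hm⟩ : ∃ hh ht, pvMsplit cs = hh :: ht := by
      cases hm : pvMsplit cs with
      | nil => exact absurd hm (pvMsplit_ne_nil cs)
      | cons hh ht => exact ⟨hh, ht, rfl⟩
    by_cases hc : c = '\''
    · subst hc
      have hsp : pvMsplit ('\'' :: cs) = [] :: pvMsplit cs := by simp [pvMsplit]
      have hjoin : PySem.Chars.join ['\''] ([] :: (pvMsplit cs).map pvLowfirst)
          = '\'' :: PySem.Chars.join ['\''] ((pvMsplit cs).map pvLowfirst) := by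
        rw [hm]
        simp only [List.map_cons]
        rw [PySem.Chars.join_cons_cons]
        rfl
      constructor
      · rw [hsp]
        simp only [List.map_cons, pvLowfirst_nil]
        rw [hjoin, ih.1]
        have hq : PySem.Chars.lowerChar '\'' = '\'' := by decide
        simp [pvGo, hq]
      · intro h t hmm
        rw [hsp] at hmm
        cases hmm
        rw [hjoin, ih.1]
        simp [pvGo]
    · have hsp : pvMsplit (c :: cs) = (c :: hh) :: ht := by simp [pvMsplit, hc, hm]
      have key : ∀ (x : Char), PySem.Chars.join ['\''] ((x :: hh) :: ht.map pvLowfirst)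
          = x :: PySem.Chars.join ['\''] (hh :: ht.map pvLowfirst) := by
        intro x
        cases ht with
        | nil => simp [PySem.Chars.join_singleton]
        | cons a b =>
          simp only [List.map_cons]
          rw [PySem.Chars.join_cons_cons, PySem.Chars.join_cons_cons]
          rfl
      have hlow : PySem.Chars.lowerChar c ≠ '\'' := by
        intro hx; exact hc ((lowerChar_eq_apos c).mp hx)
      constructor
      · rw [hsp]
        simp only [List.map_cons, pvLowfirst_cons]
        rw [key, ih.2 hh ht hm]
        have hb : (PySem.Chars.lowerChar c == '\'') = false := by simp [hlow]
        simp [pvGo, hb]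
      · intro h t hmm
        rw [hsp] at hmm
        cases hmm
        rw [key, ih.2 hh ht hm]
        have hb : (c == '\'') = false := by simp [hc]
        simp [pvGo, hb]

-- titled strings: the char after a leading apostrophe is already upper-cased
theorem tgo_second (l : List Char) (b : Bool) (c1 : Char) (cs : List Char)
    (h : pvTgo b l = '\'' :: c1 :: cs) : PySem.Chars.upperChar c1 = c1 := by
  cases l with
  | nil => simp [pvTgo] at h
  | cons d0 ds =>
    cases ds with
    | nil => simp [pvTgo] at h
    | cons d1 ds' =>
      simp only [pvTgo, List.cons.injEq] at h
      obtain ⟨h0, h1, -⟩ := h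
      have halpha0 : PySem.Chars.isalpha d0 = false := by
        by_contra hx
        have hx' : PySem.Chars.isalpha d0 = true := by
          cases hxx : PySem.Chars.isalpha d0
          · exact absurd hxx hx
          · rfl
        rw [if_pos hx'] at h0
        cases b with
        | false =>
          simp only [Bool.false_eq_true] at h0
          have := (upperChar_eq_apos d0).mp h0
          subst this
          revert hx'; decide
        | true =>
          simp only [reduceIte] at h0
          have := (lowerChar_eq_apos d0).mp h0
          subst this
          revert hx'; decide
      rw [halpha0] at h1
      simp only [Bool.false_eq_true] at h1
      by_cases ha : PySem.Chars.isalpha d1 = true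
      · rw [if_pos ha] at h1
        rw [← h1]
        exact upperChar_upperChar d1
      · rw [if_neg ha] at h1
        subst h1
        exact upperChar_of_not_alpha d1 (by cases hxx : PySem.Chars.isalpha d1 <;> simp_all)

-- A's whole loop in closed head-form
theorem A_char (base : List Char) :
    base.foldl (fun res c =>
      if res = ['\''] then res ++ [PySem.Chars.upperChar c]
      else if PySem.Chars.endswith res ['\''] then res ++ [PySem.Chars.lowerChar c]
      else res ++ [c]) []
    = (match base with
       | [] => []
       | [c0] => [c0]
       | c0 :: c1 :: cs =>
         if c0 = '\'' then
           c0 :: PySem.Chars.upperChar c1 :: pvGo (PySem.Chars.upperChar c1 == '\'') cs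
         else c0 :: c1 :: pvGo (c1 == '\'') cs) := by
  cases base with
  | nil => simp
  | cons c0 tl =>
    have hstep0 : (if ([] : List Char) = ['\''] then [PySem.Chars.upperChar c0]
        else if PySem.Chars.endswith [] ['\''] = true then [PySem.Chars.lowerChar c0]
        else [c0]) = [c0] := by
      rw [if_neg (by simp)]
      have : PySem.Chars.endswith [] ['\''] = false := by decide
      rw [this]
      simp
    cases tl with
    | nil => simpa using hstep0
    | cons c1 cs =>
      simp only [List.foldl_cons]
      rw [show ((if ([] : List Char) = ['\''] then [] ++ [PySem.Chars.upperChar c0]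
        else if PySem.Chars.endswith [] ['\''] = true then [] ++ [PySem.Chars.lowerChar c0]
        else [] ++ [c0]) : List Char) = [c0] by simpa using hstep0]
      by_cases hc0 : c0 = '\''
      · subst hc0
        rw [show (if ['\''] = ['\''] then ['\''] ++ [PySem.Chars.upperChar c1]
          else if PySem.Chars.endswith ['\''] ['\''] = true then ['\''] ++ [PySem.Chars.lowerChar c1]
          else ['\''] ++ [c1]) = ['\'', PySem.Chars.upperChar c1] by simp]
        rw [foldA cs ['\'', PySem.Chars.upperChar c1] (by simp) (by simp)]
        have : (['\'', PySem.Chars.upperChar c1]).getLast (by simp) = PySem.Chars.upperChar c1 := by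
          simp
        rw [this]
        simp
      · have h1 : ([c0] : List Char) ≠ ['\''] := by simp [hc0]
        have h2 : PySem.Chars.endswith [c0] ['\''] = (c0 == '\'') := by
          simpa using endswith_apos [] c0
        rw [show (if [c0] = ['\''] then [c0] ++ [PySem.Chars.upperChar c1]
          else if PySem.Chars.endswith [c0] ['\''] = true then [c0] ++ [PySem.Chars.lowerChar c1]
          else [c0] ++ [c1]) = [c0, c1] by
            rw [if_neg h1, h2]
            simp [hc0]]
        rw [foldA cs [c0, c1] (by simp) (by
          intro hcontra
          have := congrArg List.length hcontra
          simp at this)]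
        have : ([c0, c1] : List Char).getLast (by simp) = c1 := by simp
        rw [this]
        simp [hc0]

-- B's split/adjust/rejoin in closed head-form
theorem B_char (base : List Char) :
    PySem.Chars.join ['\'']
      (match PySem.Chars.splitOn base ['\''] with
       | [] => []
       | p0 :: rest =>
         match p0, rest with
         | [], r0 :: rtl => [] :: r0 :: rtl.map pvLowfirst
         | _, _ => p0 :: rest.map pvLowfirst)
    = (match base with
       | [] => []
       | c0 :: cs => c0 :: pvGo false cs) := by
  rw [splitOn_eq_msplit]
  cases base with
  | nil => simp [pvMsplit, PySem.Chars.join_singleton]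
  | cons c0 cs =>
    obtain ⟨hh, ht, hm⟩ : ∃ hh ht, pvMsplit cs = hh :: ht := by
      cases hm : pvMsplit cs with
      | nil => exact absurd hm (pvMsplit_ne_nil cs)
      | cons hh ht => exact ⟨hh, ht, rfl⟩
    have key : ∀ (x : Char) (u : List Char) (v : List (List Char)),
        PySem.Chars.join ['\''] ((x :: u) :: v.map pvLowfirst)
          = x :: PySem.Chars.join ['\''] (u :: v.map pvLowfirst) := by
      intro x u v
      cases v with
      | nil => simp [PySem.Chars.join_singleton]
      | cons a b =>
        simp only [List.map_cons]
        rw [PySem.Chars.join_cons_cons, PySem.Chars.join_cons_cons]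
        rfl
    by_cases hc0 : c0 = '\''
    · subst hc0
      have hsp : pvMsplit ('\'' :: cs) = [] :: pvMsplit cs := by simp [pvMsplit]
      rw [hsp, hm]
      have hjoin : PySem.Chars.join ['\''] ([] :: hh :: ht.map pvLowfirst)
          = '\'' :: PySem.Chars.join ['\''] (hh :: ht.map pvLowfirst) := by
        rw [PySem.Chars.join_cons_cons]
        rfl
      show PySem.Chars.join ['\''] ([] :: hh :: ht.map pvLowfirst) = '\'' :: pvGo false cs
      rw [hjoin, (join_msplit cs).2 hh ht hm]
    · have hsp : pvMsplit (c0 :: cs) = (c0 :: hh) :: ht := by simp [pvMsplit, hc0, hm]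
      rw [hsp]
      show PySem.Chars.join ['\''] ((c0 :: hh) :: ht.map pvLowfirst) = c0 :: pvGo false cs
      rw [key, (join_msplit cs).2 hh ht hm]

theorem customize_spec' (result : String) : customize result = customize_alt result := by
  have hB : customize_alt result = String.mk
      (PySem.Chars.join ['\'']
        (match PySem.Chars.splitOn (pvTitle result.toList) ['\''] with
         | [] => []
         | p0 :: rest =>
           match p0, rest with
           | [], r0 :: rtl => [] :: r0 :: rtl.map pvLowfirst
           | _, _ => p0 :: rest.map pvLowfirst)) := rfl
  rw [hB]
  unfold customize
  rw [pvTitle_eq_tgo]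
  rw [A_char, B_char]
  cases hb : pvTgo false result.toList with
  | nil => rfl
  | cons c0 tl =>
    cases tl with
    | nil => simp [pvGo]
    | cons c1 cs =>
      by_cases hc0 : c0 = '\''
      · subst hc0
        have hup : PySem.Chars.upperChar c1 = c1 := tgo_second result.toList false c1 cs hb
        simp [hup, pvGo]
      · simp [hc0, pvGo]

-- ===== VERDICT (by name: the statement is the Claim_ definition above) =====
theorem customize_spec : Claim_equal_customize := by
  intro result _
  exact customize_spec' result
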